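-- pv_equiv track=rewrite | github.com/GorkaUrbizu/text2cor | output2conll.py | correct_len1
-- ===== SOURCE A (Python) =====
-- def correct_len1(L, n):
-- 	L2 = []
-- 	i = 0
--
-- 	for l in L:
-- 		L2.append(l)
--
-- 		if l == "|":
-- 			i -= 1
-- 		else:
-- 			i += 1
--
-- 		if i == n:
-- 			break
-- 	return L2
-- ===== SOURCE B (Python) =====
-- def correct_len1(L, n):
--     # prefix-sum table of the +1/-1 balance, then search-and-slice
--     sums = []
--     bal = 0
--     for l in L:
--         bal += -1 if l == "|" else 1
--         sums.append(bal)
--     for idx, s in enumerate(sums):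
--         if s == n:
--             return L[:idx + 1]
--     return L[:]
-- ===== Notes on version B (the rewrite author's own statement) =====
-- stated objective: alternative
-- what changed: Replaces the append-update-break loop by a prefix-sum table of the running balance followed by a first-match search and a slice L[:idx+1] (full copy when no prefix balance equals n).
import Mathlib
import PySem

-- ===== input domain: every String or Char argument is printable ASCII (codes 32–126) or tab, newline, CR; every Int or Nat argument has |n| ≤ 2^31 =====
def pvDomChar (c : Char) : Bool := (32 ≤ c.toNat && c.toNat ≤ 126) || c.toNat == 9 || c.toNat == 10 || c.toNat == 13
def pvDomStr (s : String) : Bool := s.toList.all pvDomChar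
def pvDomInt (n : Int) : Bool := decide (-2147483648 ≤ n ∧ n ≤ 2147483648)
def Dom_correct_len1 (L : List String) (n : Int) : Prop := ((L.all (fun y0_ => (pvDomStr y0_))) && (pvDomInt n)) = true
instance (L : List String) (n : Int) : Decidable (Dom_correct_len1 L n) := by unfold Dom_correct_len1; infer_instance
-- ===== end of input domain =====

-- B rebuilds the result as a prefix-sum table of the balance plus a first-match search and slice,
-- instead of A's append-update-break loop (objective: alternative decomposition, same cost).

-- ===== PORT A =====
-- the for-loop of A: state (L2, i), append l, update i, break when i == n
def goA (n : Int) : List String → List String → Int → List String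
  | [], L2, _ => L2
  | l :: rest, L2, i =>
    let L2 := L2 ++ [l]
    let i := if l == "|" then i - 1 else i + 1
    if i == n then L2 else goA n rest L2 i

def correct_len1 (L : List String) (n : Int) : List String :=
  goA n L [] 0

-- ===== PORT B =====
-- running cumulative sums of (+1 / -1 for "|")
def altSums : List String → Int → List Int
  | [], _ => []
  | l :: rest, bal =>
    let b := bal + (if l == "|" then -1 else 1)
    b :: altSums rest b

-- first index (from start idx) whose cumulative balance equals n
def altSearch : List Int → Nat → Int → Option Nat
  | [], _, _ => none
  | s :: rest, idx, n => if s == n then some idx else altSearch rest (idx + 1) n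

def correct_len1_alt (L : List String) (n : Int) : List String :=
  match altSearch (altSums L 0) 0 n with
  | some idx => L.take (idx + 1)   -- L[:idx+1]
  | none => L                      -- L[:] (copy; same value)

-- ===== PRECONDITION & SPEC =====
def Spec_correct_len1 (L : List String) (n : Int) (out : List String) : Prop := out = correct_len1_alt L n
instance (L : List String) (n : Int) (out : List String) : Decidable (Spec_correct_len1 L n out) := by unfold Spec_correct_len1; infer_instance

-- ===== CLAIM (what is proved, stated in full; the proofs are below) =====
def Claim_equal_correct_len1 : Prop := ∀ (L : List String) (n : Int), Dom_correct_len1 L n → Spec_correct_len1 L n (correct_len1 L n)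

-- ===== LEMMAS AND PROOFS =====
theorem altSearch_shift (xs : List Int) (k : Nat) (n : Int) :
    altSearch xs (k + 1) n = (altSearch xs k n).map (· + 1) := by
  induction xs generalizing k with
  | nil => simp [altSearch]
  | cons s rest ih =>
    simp only [altSearch]
    split <;> simp [ih]

theorem goA_eq (n : Int) (L acc : List String) (bal : Int) :
    goA n L acc bal =
      match altSearch (altSums L bal) 0 n with
      | some idx => acc ++ L.take (idx + 1)
      | none => acc ++ L := by
  induction L generalizing acc bal with
  | nil => simp [goA, altSums, altSearch]
  | cons l rest ih =>
    simp only [goA, altSums, altSearch, beq_iff_eq]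
    have hbal : (if l = "|" then bal - 1 else bal + 1) = bal + if l = "|" then -1 else 1 := by
      split <;> ring
    rw [hbal]
    by_cases h : (bal + if l = "|" then -1 else 1) = n
    · rw [if_pos h, if_pos h]
      simp
    · rw [if_neg h, if_neg h, ih, show (1 : Nat) = 0 + 1 from rfl, altSearch_shift]
      cases altSearch (altSums rest (bal + if l = "|" then -1 else 1)) 0 n <;> simp

-- ===== VERDICT (by name: the statement is the Claim_ definition above) =====
theorem correct_len1_spec : Claim_equal_correct_len1 := by
  intro L n _
  unfold Spec_correct_len1 correct_len1 correct_len1_alt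
  rw [goA_eq]
  cases altSearch (altSums L 0) 0 n <;> simp
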